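-- pv_equiv track=rewrite | github.com/MichalxPZ/PUT-HackerRank-Python | PastTests/Can you get a palindrome.py | getPal
-- ===== SOURCE A (Python) =====
-- def is_palindrome(word):
--     if len(word) > 2:
--         return word == word[::-1]
--     else:
--         return True
--
-- def getPal(word):
--     word = word.lower()
--     if is_palindrome(word):
--         return "YES"
--     for i in range(len(word)):
--         if is_palindrome(word[:i] + word[i+1:]):
--             return "YES"
--         for j in range(i+1, len(word)):
--             temp_word = word[:i] + word[i+1: j] + word[j+1:]
--             if is_palindrome(temp_word):
--                 return "YES"
--     return "NO"
-- ===== SOURCE B (Python) =====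
-- def getPal(word):
--     s = word.lower()
--
--     def ok(t, k):
--         # greedily strip matching end pairs, then branch on the mismatch with deletion budget k
--         while len(t) > 1 and t[0] == t[-1]:
--             t = t[1:-1]
--         if len(t) <= 1:
--             return True
--         if k == 0:
--             return False
--         return ok(t[1:], k - 1) or ok(t[:-1], k - 1)
--
--     return "YES" if ok(s, 2) else "NO"
-- ===== Notes on version B (the rewrite author's own statement) =====
-- stated objective: faster
-- what changed: B replaces A's brute-force enumeration of all O(n^2) one- and two-character deletions (each checked by a full string reversal) with a greedy two-pointer palindrome check that strips matching end pairs and branches with a deletion budget of 2 at each mismatch.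
-- intended difference: On words whose lowercased form has exactly 4 pairwise-distinct characters (e.g. the witness 'abcd') A returns YES because its is_palindrome helper treats every string of length at most 2 as a palindrome, while B returns NO, the intended answer: no palindrome is obtainable from such a word by deleting at most 2 characters. — e.g. on getPal("abcd"): A returns "YES", B returns "NO"
import Mathlib
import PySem

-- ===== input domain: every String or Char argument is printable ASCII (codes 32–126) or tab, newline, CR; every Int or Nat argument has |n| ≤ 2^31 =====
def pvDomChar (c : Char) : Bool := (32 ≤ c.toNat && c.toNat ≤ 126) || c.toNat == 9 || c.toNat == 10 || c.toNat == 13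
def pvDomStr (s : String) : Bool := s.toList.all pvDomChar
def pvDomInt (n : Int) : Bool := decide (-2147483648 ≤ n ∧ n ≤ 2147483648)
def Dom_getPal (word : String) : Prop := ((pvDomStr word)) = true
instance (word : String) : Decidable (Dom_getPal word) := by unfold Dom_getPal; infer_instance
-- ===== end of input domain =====

-- B replaces A's brute-force enumeration of all one- and two-character deletions with a greedy
-- end-stripping check with deletion budget 2; objective: faster.

-- ===== PORT A =====
-- is_palindrome: `word == word[::-1]` for len(word) > 2, else True
-- (word[::-1] is PySem.List.slice? w none none (-1), i.e. some w.reverse by PySem.List.slice?_none_none_neg_one)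
def isPalA (w : List Char) : Bool :=
  if 2 < w.length then w == ((PySem.List.slice? w none none (-1)).getD []) else true

-- inner loop `for j in range(i+1, len(word)): temp_word = …; if is_palindrome(temp_word): return "YES"`
def aInner (s : List Char) (i : Int) : List Int → Bool
  | [] => false
  | j :: js =>
      isPalA (PySem.List.slice s none (some i) ++ PySem.List.slice s (some (i+1)) (some j)
                ++ PySem.List.slice s (some (j+1)) none)
      || aInner s i js

-- outer loop `for i in range(len(word)): if is_palindrome(word[:i] + word[i+1:]): return "YES"; …`
def aOuter (s : List Char) : List Int → Bool
  | [] => false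
  | i :: is' =>
      (isPalA (PySem.List.slice s none (some i) ++ PySem.List.slice s (some (i+1)) none)
        || aInner s i (PySem.List.pyRange (i+1) (s.length : Int) 1))
      || aOuter s is'

def getPal (word : String) : String :=
  let s := PySem.Chars.lower word.toList
  if isPalA s then "YES"
  else if aOuter s (PySem.List.pyRange 0 (s.length : Int) 1) then "YES"
  else "NO"

-- ===== PORT B =====
-- `while len(t) > 1 and t[0] == t[-1]: t = t[1:-1]` — fuelled structural loop; each iteration
-- shortens t by 2, so fuel t.length is enough (trimGo_spec below proves the fuel is never exhausted)
def trimGo (fuel : Nat) (t : List Char) : List Char :=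
  match fuel with
  | 0 => t
  | fuel + 1 =>
      if 1 < t.length ∧ PySem.List.pyGet? t 0 = PySem.List.pyGet? t (-1) then
        trimGo fuel (PySem.List.slice t (some 1) (some (-1)))
      else t

def trimB (t : List Char) : List Char := trimGo t.length t

-- body of `ok(t, k)` after the while loop
def okB (t : List Char) (k : Nat) : Bool :=
  let t' := trimB t
  if t'.length ≤ 1 then true
  else
    match k with
    | 0 => false
    | k' + 1 =>
        okB (PySem.List.slice t' (some 1) none) k' || okB (PySem.List.slice t' none (some (-1))) k'

def getPal_alt (word : String) : String :=
  if okB (PySem.Chars.lower word.toList) 2 then "YES" else "NO"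

-- ===== PRECONDITION & SPEC =====
-- On words whose lowercased form has exactly 4 pairwise-distinct characters A answers YES
-- (its is_palindrome helper calls every string of length ≤ 2 a palindrome), while B answers NO,
-- the intended answer: no palindrome is obtainable from such a word by deleting at most 2 characters.
def D_getPal (word : String) : Prop :=
  (PySem.Chars.lower word.toList).length = 4 ∧
    (PySem.Chars.lower word.toList).Pairwise (· ≠ ·)
instance (word : String) : Decidable (D_getPal word) := by unfold D_getPal; infer_instance

def Spec_getPal (word : String) (out : String) : Prop := ¬ D_getPal word → out = getPal_alt word
instance (word : String) (out : String) : Decidable (Spec_getPal word out) := by unfold Spec_getPal; infer_instance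

def pvDiffWitness_getPal : String := "abcd"
def pvDiffWitnessOut_getPal : String × String := ("YES", "NO")

-- ===== CLAIM (what is proved, stated in full; the proofs are below) =====
def Claim_unchanged_getPal : Prop := ∀ (word : String), Dom_getPal word → Spec_getPal word (getPal word)
def Claim_changed_getPal : Prop := Dom_getPal (pvDiffWitness_getPal) ∧ D_getPal (pvDiffWitness_getPal) ∧ getPal (pvDiffWitness_getPal) = pvDiffWitnessOut_getPal.1 ∧ getPal_alt (pvDiffWitness_getPal) = pvDiffWitnessOut_getPal.2 ∧ pvDiffWitnessOut_getPal.1 ≠ pvDiffWitnessOut_getPal.2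
def Claim_exact_getPal : Prop := ∀ (word : String), Dom_getPal word → D_getPal word → getPal word ≠ getPal_alt word

-- ===== LEMMAS AND PROOFS =====

-- `PalSub s k`: s has a palindromic subsequence missing at most k characters
def PalSub (s : List Char) (k : Nat) : Prop :=
  ∃ u : List Char, u.Sublist s ∧ s.length ≤ u.length + k ∧ u.reverse = u

-- one-character deletion word[:i] + word[i+1:]
def Del1 (s : List Char) (i : Nat) : List Char := s.take i ++ s.drop (i+1)
-- two-character deletion word[:i] + word[i+1:j] + word[j+1:]
def Del2 (s : List Char) (i j : Nat) : List Char :=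
  s.take i ++ ((s.drop (i+1)).take (j - (i+1))) ++ s.drop (j+1)

-- ---- palindrome facts ----
theorem pal_wrap (a : Char) (x : List Char) (h : x.reverse = x) :
    ((a :: x) ++ [a]).reverse = (a :: x) ++ [a] := by
  simp [List.reverse_append, h]

theorem pal_head_getLast (u : List Char) (h : u.reverse = u) : u.head? = u.getLast? := by
  conv_lhs => rw [← h]
  exact List.head?_reverse

theorem pal_decomp (u : List Char) (h2 : 2 ≤ u.length) (hp : u.reverse = u) :
    ∃ c x, u = (c :: x) ++ [c] ∧ x.reverse = x := by
  rcases u with _ | ⟨c, rest⟩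
  · simp at h2
  · rcases List.eq_nil_or_concat rest with h | ⟨x, d, hx⟩
    · subst h; simp at h2
    · rw [List.concat_eq_append] at hx
      subst hx
      have hrev : (c :: (x ++ [d])).reverse = d :: (x.reverse ++ [c]) := by
        rw [List.reverse_cons, List.reverse_append]
        simp
      rw [hrev] at hp
      injection hp with h1 h2'
      subst h1
      exact ⟨d, x, by simp, List.append_cancel_right h2'⟩

-- ---- PalSub under wrapping / small lists ----
theorem palsub_small (s : List Char) (k : Nat) (h : s.length ≤ k + 1) : PalSub s k := by
  rcases s with _ | ⟨c, rest⟩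
  · exact ⟨[], List.nil_sublist _, by simp, rfl⟩
  · refine ⟨[c], List.cons_sublist_cons.mpr (List.nil_sublist _), ?_, rfl⟩
    simp at h ⊢; omega

theorem palsub_wrap (a : Char) (mid : List Char) (k : Nat) (h : PalSub mid k) :
    PalSub ((a :: mid) ++ [a]) k := by
  obtain ⟨u, hs, hl, hp⟩ := h
  refine ⟨(a :: u) ++ [a], ?_, ?_, pal_wrap a u hp⟩
  · exact (List.append_sublist_append_right [a]).mpr (List.cons_sublist_cons.mpr hs)
  · simp at hl ⊢; omega

theorem sublist_of_wrap {c a : Char} {x mid : List Char}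
    (h : ((c :: x) ++ [c]).Sublist ((a :: mid) ++ [a])) : x.Sublist mid := by
  have h' : (c :: (x ++ [c])).Sublist (a :: (mid ++ [a])) := by simpa using h
  rcases List.sublist_cons_iff.mp h' with h2 | ⟨r, hr, hrs⟩
  · rcases List.sublist_append_iff.mp h2 with ⟨l1, l2, heq, h1, hl2⟩
    rcases List.sublist_cons_iff.mp hl2 with hl2' | ⟨r2, hr2, hr2s⟩
    · rw [List.sublist_nil] at hl2'
      subst hl2'
      rw [List.append_nil] at heq
      subst heq
      exact (((List.sublist_append_left x [c]).trans
        (List.sublist_cons_self c (x ++ [c])))).trans h1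
    · rw [List.sublist_nil] at hr2s
      subst hr2s
      subst hr2
      have hlen : (c :: x).length = l1.length := by
        have := congrArg List.length heq
        simp at this ⊢; omega
      have hinj := List.append_inj (by simpa using heq) hlen
      rw [← hinj.1] at h1
      exact (List.sublist_cons_self c x).trans h1
  · injection hr with h1 h2
    subst h2
    rcases List.sublist_append_iff.mp hrs with ⟨l1, l2, heq, hm, ha⟩
    rcases List.sublist_cons_iff.mp ha with ha' | ⟨r2, hr2, hr2s⟩
    · rw [List.sublist_nil] at ha'
      subst ha'
      rw [List.append_nil] at heq
      subst heq
      exact (List.sublist_append_left x [c]).trans hm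
    · rw [List.sublist_nil] at hr2s
      subst hr2s
      subst hr2
      have hlen : x.length = l1.length := by
        have := congrArg List.length heq
        simp at this ⊢; omega
      have hinj := List.append_inj heq hlen
      rw [← hinj.1] at hm
      exact hm

theorem palsub_unwrap (a : Char) (mid : List Char) (k : Nat)
    (h : PalSub ((a :: mid) ++ [a]) k) : PalSub mid k := by
  obtain ⟨u, hs, hl, hp⟩ := h
  simp only [List.length_append, List.length_cons] at hl
  by_cases hu : u.length ≤ 1
  · exact ⟨[], List.nil_sublist _, by simp; omega, rfl⟩
  · obtain ⟨c, x, hux, hx⟩ := pal_decomp u (by omega) hp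
    subst hux
    refine ⟨x, sublist_of_wrap hs, ?_, hx⟩
    simp at hl ⊢; omega

-- ---- pyGet? at 0 / -1, slice forms ----
theorem pyGet_zero (t : List Char) : PySem.List.pyGet? t 0 = t.head? := by
  simp [pysem, List.head?_eq_getElem?]

theorem pyGet_neg_one (t : List Char) : PySem.List.pyGet? t (-1) = t.getLast? := by
  rcases t with _ | ⟨a, r⟩
  · rfl
  · simp [PySem.List.pyGet?, PySem.List.pyIdx?, List.getLast?_eq_getElem?]

theorem slice_one_neg_one (t : List Char) (h : 1 < t.length) :
    PySem.List.slice t (some 1) (some (-1)) = (t.drop 1).dropLast := by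
  have ht : t ≠ [] := by rintro rfl; simp at h
  have h1 : min 1 t.length = 1 := by omega
  simp [PySem.List.slice, PySem.List.clampIdx, ht, h1]
  rw [List.dropLast_eq_take]
  congr 1
  simp
  omega

theorem slice_none_neg_one (t : List Char) : PySem.List.slice t none (some (-1)) = t.dropLast :=
  PySem.List.slice_to_neg_one t

-- a list with equal first and last elements and length ≥ 2 wraps a middle
theorem wrap_decomp (t : List Char) (h : 1 < t.length)
    (he : PySem.List.pyGet? t 0 = PySem.List.pyGet? t (-1)) :
    ∃ a mid, t = (a :: mid) ++ [a] ∧ PySem.List.slice t (some 1) (some (-1)) = mid := by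
  rcases t with _ | ⟨c, rest⟩
  · simp at h
  · rcases List.eq_nil_or_concat rest with hr | ⟨x, d, hx⟩
    · subst hr; simp at h
    · rw [List.concat_eq_append] at hx
      subst hx
      rw [pyGet_zero, pyGet_neg_one] at he
      rw [show (c :: (x ++ [d])).getLast? = some d by
        rw [show c :: (x ++ [d]) = (c :: x) ++ [d] by simp, List.getLast?_concat]] at he
      simp only [List.head?_cons, Option.some.injEq] at he
      subst he
      refine ⟨c, x, by simp, ?_⟩
      rw [slice_one_neg_one _ h]
      simp

-- ---- trim loop ----
theorem trimGo_palsub (fuel : Nat) (t : List Char) (hf : t.length ≤ fuel) (k : Nat) :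
    (PalSub (trimGo fuel t) k ↔ PalSub t k) := by
  induction fuel generalizing t with
  | zero => rfl
  | succ fuel ih =>
    rw [trimGo]
    split
    · rename_i hg
      obtain ⟨a, mid, heq, hmid⟩ := wrap_decomp _ hg.1 hg.2
      rw [hmid]
      have hlen : mid.length + 2 ≤ fuel + 1 := by
        have := hf
        rw [heq] at this
        simp at this; omega
      rw [ih mid (by omega), heq]
      constructor
      · exact palsub_wrap a mid k
      · exact palsub_unwrap a mid k
    · rfl

theorem trimGo_fix (fuel : Nat) (t : List Char) (hf : t.length ≤ fuel) :
    ¬(1 < (trimGo fuel t).length ∧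
        PySem.List.pyGet? (trimGo fuel t) 0 = PySem.List.pyGet? (trimGo fuel t) (-1)) := by
  induction fuel generalizing t with
  | zero =>
    have ht : t = [] := by
      rcases t with _ | _
      · rfl
      · simp at hf
    subst ht
    simp [trimGo]
  | succ fuel ih =>
    rw [trimGo]
    split
    · rename_i hg
      obtain ⟨a, mid, heq, hmid⟩ := wrap_decomp _ hg.1 hg.2
      rw [hmid]
      apply ih
      have : t.length = mid.length + 2 := by rw [heq]; simp
      omega
    · rename_i hg
      exact hg

theorem trimB_palsub (t : List Char) (k : Nat) : PalSub (trimB t) k ↔ PalSub t k :=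
  trimGo_palsub t.length t le_rfl k

theorem trimB_fix (t : List Char) :
    ¬(1 < (trimB t).length ∧
        PySem.List.pyGet? (trimB t) 0 = PySem.List.pyGet? (trimB t) (-1)) :=
  trimGo_fix t.length t le_rfl

-- a trimmed list of length ≥ 2 has distinct first and last characters
theorem trimB_decomp (t : List Char) (h : 1 < (trimB t).length) :
    ∃ a m b, trimB t = (a :: m) ++ [b] ∧ a ≠ b := by
  rcases ht : trimB t with _ | ⟨a, rest⟩
  · rw [ht] at h; simp at h
  · rw [ht] at h
    rcases List.eq_nil_or_concat rest with hr | ⟨m, b, hm⟩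
    · subst hr; simp at h
    · rw [List.concat_eq_append] at hm
      subst hm
      refine ⟨a, m, b, by simp, ?_⟩
      intro hab
      subst hab
      apply trimB_fix t
      rw [ht]
      refine ⟨by simp, ?_⟩
      rw [pyGet_zero, pyGet_neg_one]
      rw [show a :: (m ++ [a]) = (a :: m) ++ [a] by simp, List.getLast?_concat]
      rfl

theorem okB_zero (t : List Char) : okB t 0 = decide ((trimB t).length ≤ 1) := by
  simp only [okB]
  split <;> simp_all

theorem okB_succ (t : List Char) (k : Nat) :
    okB t (k+1) = if (trimB t).length ≤ 1 then true
      else okB (trimB t).tail k || okB (trimB t).dropLast k := by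
  conv_lhs => rw [okB]
  rw [PySem.List.slice_from_one, slice_none_neg_one]

theorem not_palsub_zero (t : List Char) (h : 1 < (trimB t).length) : ¬ PalSub (trimB t) 0 := by
  rintro ⟨u, hs, hl, hp⟩
  have hu : u = trimB t := hs.eq_of_length_le (by omega)
  subst hu
  obtain ⟨a, m, b, heq, hab⟩ := trimB_decomp t h
  apply hab
  have h2 := pal_head_getLast _ hp
  rw [heq, List.getLast?_concat, List.cons_append, List.head?_cons] at h2
  exact Option.some.inj h2

theorem okB_iff (k : Nat) (t : List Char) : okB t k = true ↔ PalSub t k := by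
  induction k generalizing t with
  | zero =>
    rw [okB_zero, ← trimB_palsub t 0, decide_eq_true_eq]
    constructor
    · intro h1
      exact palsub_small _ 0 (by omega)
    · intro hp
      by_contra hlen
      exact not_palsub_zero t (by omega) hp
  | succ k ih =>
    rw [okB_succ, ← trimB_palsub t (k+1)]
    split
    · rename_i h1
      simp only [true_iff]
      exact palsub_small _ (k+1) (by omega)
    · rename_i h1
      obtain ⟨a, m, b, heq, hab⟩ := trimB_decomp t (by omega)
      rw [Bool.or_eq_true, ih, ih]
      constructor
      · rintro (⟨u, hs, hl, hp⟩ | ⟨u, hs, hl, hp⟩)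
        · refine ⟨u, hs.trans (List.tail_sublist _), ?_, hp⟩
          rw [List.length_tail] at hl; omega
        · refine ⟨u, hs.trans (List.dropLast_sublist _), ?_, hp⟩
          rw [List.length_dropLast] at hl; omega
      · rintro ⟨u, hs, hl, hp⟩
        rw [heq] at hs hl
        have hs' : u.Sublist (a :: (m ++ [b])) := by simpa using hs
        simp only [List.length_append, List.length_cons] at hl
        rcases List.sublist_cons_iff.mp hs' with h' | ⟨v, hv, hvs⟩
        · left
          refine ⟨u, ?_, ?_, hp⟩
          · rw [heq, List.cons_append, List.tail_cons]
            exact h'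
          · rw [heq, List.cons_append, List.tail_cons]
            simp at hl ⊢; omega
        · subst hv
          rcases List.sublist_append_iff.mp hvs with ⟨l1, l2, hveq, hl1, hl2⟩
          rcases List.sublist_cons_iff.mp hl2 with hl2' | ⟨r2, hr2, hr2s⟩
          · rw [List.sublist_nil] at hl2'
            subst hl2'
            rw [List.append_nil] at hveq
            rw [← hveq] at hl1
            right
            refine ⟨a :: v, ?_, ?_, hp⟩
            · rw [heq, List.dropLast_concat]
              exact List.cons_sublist_cons.mpr hl1
            · rw [heq, List.dropLast_concat]
              simp at hl ⊢; omega
          · rw [List.sublist_nil] at hr2s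
            subst hr2s
            subst hr2
            subst hveq
            exfalso
            apply hab
            have h2 := pal_head_getLast _ hp
            rw [show a :: (l1 ++ [b]) = (a :: l1) ++ [b] from by rw [List.cons_append],
              List.getLast?_concat, List.cons_append, List.head?_cons] at h2
            exact Option.some.inj h2

-- ---- A-side characterization ----
theorem isPalA_iff (w : List Char) : isPalA w = true ↔ (2 < w.length → w.reverse = w) := by
  unfold isPalA
  rw [PySem.List.slice?_none_none_neg_one]
  split
  · rename_i hlen
    simp only [Option.getD_some, beq_iff_eq]
    constructor
    · intro h _
      exact h.symm
    · intro h
      exact (h hlen).symm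
  · rename_i hlen
    simp only [true_iff]
    intro h
    exact absurd h hlen

theorem aInner_iff (s : List Char) (i : Int) (js : List Int) :
    aInner s i js = true ↔ ∃ j ∈ js,
      isPalA (PySem.List.slice s none (some i) ++ PySem.List.slice s (some (i+1)) (some j)
                ++ PySem.List.slice s (some (j+1)) none) = true := by
  induction js with
  | nil => simp [aInner]
  | cons j js ih =>
    rw [aInner, Bool.or_eq_true, ih]
    constructor
    · rintro (h | ⟨j', hj', h⟩)
      · exact ⟨j, List.mem_cons_self, h⟩
      · exact ⟨j', List.mem_cons_of_mem _ hj', h⟩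
    · rintro ⟨j', hj', h⟩
      rcases List.mem_cons.mp hj' with rfl | hj'
      · exact Or.inl h
      · exact Or.inr ⟨j', hj', h⟩

theorem aOuter_iff (s : List Char) (is' : List Int) :
    aOuter s is' = true ↔ ∃ i ∈ is',
      (isPalA (PySem.List.slice s none (some i) ++ PySem.List.slice s (some (i+1)) none) = true
        ∨ aInner s i (PySem.List.pyRange (i+1) (s.length : Int) 1) = true) := by
  induction is' with
  | nil => simp [aOuter]
  | cons i is' ih =>
    rw [aOuter, Bool.or_eq_true, Bool.or_eq_true, ih]
    constructor
    · rintro ((h | h) | ⟨i', hi', h⟩)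
      · exact ⟨i, List.mem_cons_self, Or.inl h⟩
      · exact ⟨i, List.mem_cons_self, Or.inr h⟩
      · exact ⟨i', List.mem_cons_of_mem _ hi', h⟩
    · rintro ⟨i', hi', h⟩
      rcases List.mem_cons.mp hi' with rfl | hi'
      · exact Or.inl h
      · exact Or.inr ⟨i', hi', h⟩

def AyesBool (s : List Char) : Bool :=
  isPalA s || aOuter s (PySem.List.pyRange 0 (s.length : Int) 1)

theorem getPal_eq (word : String) :
    getPal word = if AyesBool (PySem.Chars.lower word.toList) then "YES" else "NO" := by
  unfold getPal AyesBool
  by_cases h1 : isPalA (PySem.Chars.lower word.toList) = true <;>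
    by_cases h2 : aOuter (PySem.Chars.lower word.toList)
      (PySem.List.pyRange 0 ((PySem.Chars.lower word.toList).length : Int) 1) = true <;>
    simp [h1, h2]

theorem sliceDel1 (s : List Char) (i : Int) (h0 : 0 ≤ i) :
    PySem.List.slice s none (some i) ++ PySem.List.slice s (some (i+1)) none
      = Del1 s i.toNat := by
  rw [PySem.List.slice_to s h0, PySem.List.slice_from s (by omega : (0:Int) ≤ i + 1)]
  unfold Del1
  congr 1
  rw [Int.toNat_add h0 (by norm_num), Int.toNat_one]

theorem sliceDel2 (s : List Char) (i j : Int) (h0 : 0 ≤ i) (hj : 0 ≤ j) :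
    PySem.List.slice s none (some i) ++ PySem.List.slice s (some (i+1)) (some j)
      ++ PySem.List.slice s (some (j+1)) none = Del2 s i.toNat j.toNat := by
  rw [PySem.List.slice_to s h0,
    PySem.List.slice_toNat s (a := i + 1) (b := j) (by omega) hj,
    PySem.List.slice_from s (by omega : (0:Int) ≤ j + 1)]
  unfold Del2
  rw [Int.toNat_add h0 (by norm_num), Int.toNat_add hj (by norm_num), Int.toNat_one]

-- A says YES iff the word, some Del1 or some Del2 passes is_palindrome
theorem Ayes_iff (s : List Char) : AyesBool s = true ↔
    (isPalA s = true ∨ (∃ i, i < s.length ∧ isPalA (Del1 s i) = true)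
      ∨ (∃ i j, i < j ∧ j < s.length ∧ isPalA (Del2 s i j) = true)) := by
  unfold AyesBool
  rw [Bool.or_eq_true, aOuter_iff]
  constructor
  · rintro (h | ⟨i, hmem, h | h⟩)
    · exact Or.inl h
    · rw [PySem.List.mem_pyRange_one] at hmem
      refine Or.inr (Or.inl ⟨i.toNat, by omega, ?_⟩)
      rwa [sliceDel1 s i hmem.1] at h
    · rw [PySem.List.mem_pyRange_one] at hmem
      rw [aInner_iff] at h
      obtain ⟨j, hjmem, h⟩ := h
      rw [PySem.List.mem_pyRange_one] at hjmem
      refine Or.inr (Or.inr ⟨i.toNat, j.toNat, by omega, by omega, ?_⟩)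
      rwa [sliceDel2 s i j hmem.1 (by omega)] at h
  · rintro (h | ⟨i, hi, h⟩ | ⟨i, j, hij, hj, h⟩)
    · exact Or.inl h
    · refine Or.inr ⟨(i : Int), ?_, Or.inl ?_⟩
      · rw [PySem.List.mem_pyRange_one]
        constructor <;> omega
      · rw [sliceDel1 s (i : Int) (Int.natCast_nonneg i)]
        simpa using h
    · refine Or.inr ⟨(i : Int), ?_, Or.inr ?_⟩
      · rw [PySem.List.mem_pyRange_one]
        constructor <;> omega
      · rw [aInner_iff]
        refine ⟨(j : Int), ?_, ?_⟩
        · rw [PySem.List.mem_pyRange_one]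
          constructor <;> omega
        · rw [sliceDel2 s (i : Int) (j : Int) (Int.natCast_nonneg i) (Int.natCast_nonneg j)]
          simpa using h

-- ---- deletion structure ----
theorem del1_sublist (s : List Char) (i : Nat) : (Del1 s i).Sublist s := by
  unfold Del1
  conv_rhs => rw [← List.take_append_drop i s]
  exact List.Sublist.append (List.Sublist.refl _)
    (List.drop_sublist_drop_left s (Nat.le_succ i))

theorem del1_length (s : List Char) (i : Nat) (h : i < s.length) :
    (Del1 s i).length = s.length - 1 := by
  unfold Del1
  simp
  omega

theorem del2_sublist (s : List Char) (i j : Nat) (hij : i < j) : (Del2 s i j).Sublist s := by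
  unfold Del2
  rw [List.append_assoc]
  conv_rhs => rw [← List.take_append_drop i s]
  apply List.Sublist.append (List.Sublist.refl _)
  have h2 : (s.drop (i+1)).take (j - (i+1)) ++ s.drop j = s.drop (i+1) := by
    conv_rhs => rw [← List.take_append_drop (j - (i+1)) (s.drop (i+1))]
    congr 1
    rw [List.drop_drop]
    congr 1
    omega
  refine List.Sublist.trans ?_ (List.drop_sublist_drop_left s (Nat.le_succ i))
  conv_rhs => rw [← h2]
  exact (List.append_sublist_append_left _).mpr (List.drop_sublist_drop_left s (Nat.le_succ j))

theorem del2_length (s : List Char) (i j : Nat) (hij : i < j) (hj : j < s.length) :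
    (Del2 s i j).length = s.length - 2 := by
  unfold Del2
  simp
  omega

theorem sub1 (u s : List Char) (h : u.Sublist s) (hlen : u.length + 1 = s.length) :
    ∃ i, i < s.length ∧ u = Del1 s i := by
  revert hlen
  induction h with
  | slnil =>
    intro hlen
    simp at hlen
  | cons a h ih =>
    intro hlen
    rename_i l₁ l₂
    have hl : l₁ = l₂ := h.eq_of_length_le (by simp at hlen; omega)
    subst hl
    exact ⟨0, by simp, by simp [Del1]⟩
  | cons₂ a h ih =>
    intro hlen
    rename_i l₁ l₂
    obtain ⟨i, hi, hu⟩ := ih (by simpa using hlen)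
    subst hu
    refine ⟨i+1, by simp; omega, ?_⟩
    simp [Del1, List.take_succ_cons, List.drop_succ_cons]

theorem sub2 (u s : List Char) (h : u.Sublist s) (hlen : u.length + 2 = s.length) :
    ∃ i j, i < j ∧ j < s.length ∧ u = Del2 s i j := by
  revert hlen
  induction h with
  | slnil =>
    intro hlen
    simp at hlen
  | cons a h ih =>
    intro hlen
    rename_i l₁ l₂
    obtain ⟨i, hi, hu⟩ := sub1 l₁ l₂ h (by simp at hlen; omega)
    subst hu
    refine ⟨0, i+1, by omega, by simp; omega, ?_⟩
    simp [Del1, Del2, List.drop_succ_cons]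
  | cons₂ a h ih =>
    intro hlen
    rename_i l₁ l₂
    obtain ⟨i, j, hij, hj, hu⟩ := ih (by simpa using hlen)
    subst hu
    refine ⟨i+1, j+1, by omega, by simp; omega, ?_⟩
    unfold Del2
    have harith : j + 1 - (i + 1 + 1) = j - (i + 1) := by omega
    rw [harith]
    simp [List.take_succ_cons, List.drop_succ_cons]

-- ---- main list-level equivalence ----
theorem main_list (s : List Char) (hD : ¬(s.length = 4 ∧ s.Pairwise (· ≠ ·))) :
    AyesBool s = okB s 2 := by
  have hiff : AyesBool s = true ↔ okB s 2 = true := by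
    rw [Ayes_iff, okB_iff]
    by_cases h5 : 5 ≤ s.length
    · constructor
      · rintro (h | ⟨i, hi, h⟩ | ⟨i, j, hij, hj, h⟩)
        · rw [isPalA_iff] at h
          exact ⟨s, List.Sublist.refl _, by omega, h (by omega)⟩
        · rw [isPalA_iff] at h
          refine ⟨Del1 s i, del1_sublist s i, ?_, h ?_⟩ <;>
            rw [del1_length s i hi] <;> omega
        · rw [isPalA_iff] at h
          refine ⟨Del2 s i j, del2_sublist s i j hij, ?_, h ?_⟩ <;>
            rw [del2_length s i j hij hj] <;> omega
      · rintro ⟨u, hs, hl, hp⟩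
        have hle := hs.length_le
        rcases (by omega : u.length = s.length ∨ u.length + 1 = s.length
            ∨ u.length + 2 = s.length) with h0 | h1 | h2
        · have hu : u = s := hs.eq_of_length_le (by omega)
          subst hu
          exact Or.inl ((isPalA_iff u).mpr (fun _ => hp))
        · obtain ⟨i, hi, hu⟩ := sub1 u s hs h1
          subst hu
          exact Or.inr (Or.inl ⟨i, hi, (isPalA_iff _).mpr (fun _ => hp)⟩)
        · obtain ⟨i, j, hij, hj, hu⟩ := sub2 u s hs h2
          subst hu
          exact Or.inr (Or.inr ⟨i, j, hij, hj, (isPalA_iff _).mpr (fun _ => hp)⟩)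
    · by_cases h4 : s.length = 4
      · have hnd : ¬ s.Nodup := by
          intro hpw
          exact hD ⟨h4, hpw⟩
        have hdup : ∃ a, [a, a].Sublist s := by
          rw [List.nodup_iff_sublist] at hnd
          rw [not_forall] at hnd
          obtain ⟨a, ha⟩ := hnd
          exact ⟨a, not_not.mp ha⟩
        obtain ⟨a, ha⟩ := hdup
        refine iff_of_true (Or.inr (Or.inr ⟨0, 1, by omega, by omega, ?_⟩)) ?_
        · rw [isPalA_iff]
          intro hh
          rw [del2_length s 0 1 (by omega) (by omega), h4] at hh
          omega
        · exact ⟨[a, a], ha, by simp; omega, rfl⟩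
      · have h3 : s.length ≤ 3 := by omega
        refine iff_of_true ?_ (palsub_small s 2 (by omega))
        by_cases h2 : s.length ≤ 2
        · refine Or.inl ((isPalA_iff s).mpr ?_)
          intro hh
          omega
        · refine Or.inr (Or.inl ⟨0, by omega, (isPalA_iff _).mpr ?_⟩)
          intro hh
          rw [del1_length s 0 (by omega)] at hh
          omega
  cases hA : AyesBool s <;> cases hB : okB s 2 <;> simp_all

-- ===== VERDICT (by name: the statement is the Claim_ definition above) =====
theorem getPal_spec : Claim_unchanged_getPal := by
  intro word _ hD
  unfold D_getPal at hD
  rw [getPal_eq]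
  show _ = getPal_alt word
  unfold getPal_alt
  rw [main_list _ hD]

theorem getPal_changed : Claim_changed_getPal := by
  unfold Claim_changed_getPal; decide

theorem getPal_tight : Claim_exact_getPal := by
  intro word _ hD
  obtain ⟨h4, hpw⟩ := hD
  rw [getPal_eq]
  unfold getPal_alt
  have hA : AyesBool (PySem.Chars.lower word.toList) = true := by
    rw [Ayes_iff]
    refine Or.inr (Or.inr ⟨0, 1, by omega, by omega, ?_⟩)
    rw [isPalA_iff]
    intro hh
    rw [del2_length _ 0 1 (by omega) (by omega), h4] at hh
    omega
  have hB : okB (PySem.Chars.lower word.toList) 2 = false := by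
    rw [← Bool.not_eq_true, okB_iff]
    rintro ⟨u, hs, hl, hp⟩
    have hpu : u.Pairwise (· ≠ ·) := hpw.sublist hs
    have hu2 : 2 ≤ u.length := by omega
    obtain ⟨c, x, hu, _⟩ := pal_decomp u hu2 hp
    subst hu
    rw [List.cons_append, List.pairwise_cons] at hpu
    exact hpu.1 c (by simp) rfl
  rw [hA, hB]
  decide
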